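-- pv_equiv track=rewrite | github.com/GeoHaber/X_Ray_LLM | Analysis/typecheck.py | _rule_to_category
-- ===== SOURCE A (Python) =====
-- def _rule_to_category(rule: str) -> str:
--     """Convert a pyright rule name to a kebab-case category slug.
--
--     ``reportCallIssue`` → ``call-issue``
--     ``reportArgumentType`` → ``argument-type``
--     """
--     if not rule:
--         return "type-error"
--     # Strip 'report' prefix
--     name = rule
--     if name.startswith("report"):
--         name = name[6:]
--     # Convert camelCase to kebab-case
--     parts: list = []
--     current: list = []
--     for ch in name:
--         if ch.isupper() and current:
--             parts.append("".join(current).lower())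
--             current = [ch]
--         else:
--             current.append(ch)
--     if current:
--         parts.append("".join(current).lower())
--     return "-".join(parts) or "type-error"
-- ===== SOURCE B (Python) =====
-- def _rule_to_category(rule: str) -> str:
--     """Convert a pyright rule name to a kebab-case category slug.
--
--     Table-driven: a precomputed str.translate table maps each ASCII uppercase
--     letter to '-' + its lowercase form in one whole-string pass; the spurious
--     leading dash (when the stripped name starts uppercase) is then removed.
--     """
--     if not rule:
--         return "type-error"
--     name = rule[6:] if rule.startswith("report") else rule
--     table = {ord(c): "-" + chr(ord(c) + 32) for c in "ABCDEFGHIJKLMNOPQRSTUVWXYZ"}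
--     s = name.translate(table)
--     if name and ord(name[0]) in table:
--         s = s[1:]
--     return s or "type-error"
-- ===== Notes on version B (the rewrite author's own statement) =====
-- stated objective: faster
-- what changed: Replaces A's character loop with its two-buffer grouping state (parts/current joined into a slug) by a loop-free table-driven rewrite: a precomputed str.translate table sends every uppercase letter to its lowercase form prefixed with the separator in one whole-string translate call, then the spurious leading separator is dropped.
import Mathlib
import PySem

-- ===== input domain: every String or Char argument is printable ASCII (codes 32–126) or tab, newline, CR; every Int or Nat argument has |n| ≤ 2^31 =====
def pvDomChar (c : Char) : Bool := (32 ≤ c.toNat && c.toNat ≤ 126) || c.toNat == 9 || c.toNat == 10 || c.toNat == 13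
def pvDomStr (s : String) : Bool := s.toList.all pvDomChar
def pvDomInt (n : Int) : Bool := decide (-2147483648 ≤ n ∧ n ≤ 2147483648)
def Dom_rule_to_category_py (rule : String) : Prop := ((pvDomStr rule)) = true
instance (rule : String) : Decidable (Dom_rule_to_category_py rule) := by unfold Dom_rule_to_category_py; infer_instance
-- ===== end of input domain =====

-- B replaces A's character loop with two string buffers (parts/current, joined into the slug) by a
-- loop-free table-driven rewrite: a translate table maps each uppercase letter to separator+lowercase
-- in one whole-string pass, then the spurious leading separator is dropped; measured faster (C-level translate).


-- ===== PORT A =====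
-- A's character loop: state (parts, current), exactly as in the Python.
def ruleA_loop : List Char → List (List Char) → List Char → List (List Char) × List Char
  | [], parts, current => (parts, current)
  | ch :: rest, parts, current =>
    if PySem.Chars.isupper ch && !current.isEmpty then
      ruleA_loop rest (parts ++ [PySem.Chars.lower current]) [ch]
    else
      ruleA_loop rest parts (current ++ [ch])

def rule_to_category_py (rule : String) : String :=
  if rule.toList.isEmpty then "type-error" else
  let name :=
    if PySem.Chars.startswith rule.toList "report".toList then
      PySem.List.slice rule.toList (some 6) none
    else rule.toList
  let pc := ruleA_loop name [] []
  let parts := if !pc.2.isEmpty then pc.1 ++ [PySem.Chars.lower pc.2] else pc.1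
  let res := PySem.Chars.join ['-'] parts
  if res.isEmpty then "type-error" else String.ofList res

-- ===== PORT B =====
-- B's translate table: maps ord of each uppercase letter to separator + lowercase letter.
def ruleB_table : PySem.Dict Int (List Char) :=
  "ABCDEFGHIJKLMNOPQRSTUVWXYZ".toList.foldl
    (fun d c => d.insert ((c.toNat : Int)) ['-', Char.ofNat (c.toNat + 32)]) PySem.Dict.empty

-- str.translate: each character is replaced by its table entry, untabled characters kept.
def ruleB_translate (cs : List Char) : List Char :=
  cs.flatMap (fun c => (ruleB_table.get? ((c.toNat : Int))).getD [c])

def rule_to_category_py_alt (rule : String) : String :=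
  if rule.toList.isEmpty then "type-error" else
  let name :=
    if PySem.Chars.startswith rule.toList "report".toList then
      PySem.List.slice rule.toList (some 6) none
    else rule.toList
  let s := ruleB_translate name
  let s2 :=
    match name with
    | [] => s
    | c0 :: _ => if ruleB_table.contains ((c0.toNat : Int)) then PySem.List.slice s (some 1) none else s
  if s2.isEmpty then "type-error" else String.ofList s2

-- ===== PRECONDITION & SPEC =====
def Spec_rule_to_category_py (rule : String) (out : String) : Prop := out = rule_to_category_py_alt rule
instance (rule : String) (out : String) : Decidable (Spec_rule_to_category_py rule out) := by unfold Spec_rule_to_category_py; infer_instance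

-- ===== CLAIM (what is proved, stated in full; the proofs are below) =====
def Claim_equal_rule_to_category_py : Prop := ∀ (rule : String), Dom_rule_to_category_py rule → Spec_rule_to_category_py rule (rule_to_category_py rule)

-- ===== LEMMAS AND PROOFS =====

-- Common normal form: the per-character emission both programs amount to.
def emitPos : List Char → List Char
  | [] => []
  | ch :: rest =>
    (if PySem.Chars.isupper ch then ['-', PySem.Chars.lowerChar ch]
     else [PySem.Chars.lowerChar ch]) ++ emitPos rest

-- What the concrete 26-entry table does on every ASCII/control code (finite check).
theorem ruleB_table_spec : ∀ n : Nat, n < 128 →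
    ((ruleB_table.get? ((n : Int))).getD [Char.ofNat n] =
      (if PySem.Chars.isupper (Char.ofNat n) then ['-', PySem.Chars.lowerChar (Char.ofNat n)]
       else [PySem.Chars.lowerChar (Char.ofNat n)])
     ∧ ruleB_table.contains ((n : Int)) = PySem.Chars.isupper (Char.ofNat n)) := by
  set_option maxRecDepth 4096 in decide

theorem domChar_lt (c : Char) (h : pvDomChar c = true) : c.toNat < 128 := by
  simp [pvDomChar] at h; omega

theorem table_entry (c : Char) (h : pvDomChar c = true) :
    (ruleB_table.get? ((c.toNat : Int))).getD [c] =
      (if PySem.Chars.isupper c then ['-', PySem.Chars.lowerChar c]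
       else [PySem.Chars.lowerChar c]) := by
  have := (ruleB_table_spec c.toNat (domChar_lt c h)).1
  rwa [Char.ofNat_toNat] at this

theorem table_contains (c : Char) (h : pvDomChar c = true) :
    ruleB_table.contains ((c.toNat : Int)) = PySem.Chars.isupper c := by
  have := (ruleB_table_spec c.toNat (domChar_lt c h)).2
  rwa [Char.ofNat_toNat] at this

-- B's translate over a domain string is the common emission.
theorem translate_eq (cs : List Char) (h : cs.all pvDomChar = true) :
    ruleB_translate cs = emitPos cs := by
  induction cs with
  | nil => rfl
  | cons c rest ih =>
    simp only [List.all_cons, Bool.and_eq_true] at h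
    show ((ruleB_table.get? ((c.toNat : Int))).getD [c]) ++ ruleB_translate rest = emitPos (c :: rest)
    rw [table_entry c h.1, ih h.2, emitPos]

-- A's loop with an empty parts accumulator determines the loop for any accumulator.
theorem ruleA_loop_parts (rest : List Char) (parts : List (List Char)) (current : List Char) :
    ruleA_loop rest parts current =
      (parts ++ (ruleA_loop rest [] current).1, (ruleA_loop rest [] current).2) := by
  induction rest generalizing parts current with
  | nil => simp [ruleA_loop]
  | cons ch rest ih =>
    by_cases h : (PySem.Chars.isupper ch && !current.isEmpty) = true
    · rw [ruleA_loop, if_pos h, ruleA_loop, if_pos h, ih, ih ([] ++ [PySem.Chars.lower current])]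
      simp
    · rw [ruleA_loop, if_neg h, ruleA_loop, if_neg h, ih]

-- The loop never empties `current` once it is nonempty, and its joined finalisation
-- is exactly current lowered followed by the common emission of the rest.
theorem ruleA_join_eq (rest : List Char) (current : List Char) (hc : current ≠ []) :
    (ruleA_loop rest [] current).2 ≠ [] ∧
    PySem.Chars.join ['-']
        ((ruleA_loop rest [] current).1 ++ [PySem.Chars.lower (ruleA_loop rest [] current).2]) =
      PySem.Chars.lower current ++ emitPos rest := by
  induction rest generalizing current with
  | nil => simp [ruleA_loop, emitPos, PySem.Chars.join_singleton, hc]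
  | cons ch rest ih =>
    by_cases h : PySem.Chars.isupper ch = true
    · have hcond : (PySem.Chars.isupper ch && !current.isEmpty) = true := by
        simp [h, hc]
      rw [ruleA_loop, if_pos hcond, ruleA_loop_parts rest ([] ++ [PySem.Chars.lower current]) [ch]]
      simp only [List.nil_append]
      obtain ⟨h1, h2⟩ := ih [ch] (by simp)
      refine ⟨h1, ?_⟩
      have hne : (ruleA_loop rest [] [ch]).1 ++ [PySem.Chars.lower (ruleA_loop rest [] [ch]).2] ≠ [] := by
        simp
      obtain ⟨y, L, hyL⟩ := List.exists_cons_of_ne_nil hne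
      simp only [List.append_assoc]
      rw [hyL, List.singleton_append, PySem.Chars.join_cons_cons, ← hyL, h2]
      simp [emitPos, h, PySem.Chars.lower]
    · have hcond : (PySem.Chars.isupper ch && !current.isEmpty) = false := by simp [h]
      rw [ruleA_loop, if_neg (by simp [hcond])]
      obtain ⟨h1, h2⟩ := ih (current ++ [ch]) (by simp)
      refine ⟨h1, ?_⟩
      rw [h2]
      simp [emitPos, h, PySem.Chars.lower]

-- A's whole kebab-casing of a nonempty domain name equals B's translate-and-strip of it.
theorem kebab_eq (c0 : Char) (rest : List Char) (h : (c0 :: rest).all pvDomChar = true) :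
    (let pc := ruleA_loop (c0 :: rest) [] []
     PySem.Chars.join ['-']
       (if !pc.2.isEmpty then pc.1 ++ [PySem.Chars.lower pc.2] else pc.1)) =
    (let s := ruleB_translate (c0 :: rest)
     if ruleB_table.contains ((c0.toNat : Int)) then PySem.List.slice s (some 1) none else s) := by
  simp only [List.all_cons, Bool.and_eq_true] at h
  have hstep : ruleA_loop (c0 :: rest) [] [] = ruleA_loop rest [] [c0] := by
    simp [ruleA_loop]
  obtain ⟨h1, h2⟩ := ruleA_join_eq rest [c0] (by simp)
  have h3 : (!(ruleA_loop rest [] [c0]).2.isEmpty) = true := by simp [h1]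
  have htr : ruleB_translate (c0 :: rest) =
      ((ruleB_table.get? ((c0.toNat : Int))).getD [c0]) ++ emitPos rest := by
    simp only [ruleB_translate, List.flatMap_cons]
    rw [← ruleB_translate, translate_eq rest h.2]
  simp only [hstep, h3, if_true]
  rw [h2, htr, table_entry c0 h.1, table_contains c0 h.1]
  by_cases hu : PySem.Chars.isupper c0 = true
  · simp only [hu, if_true]
    rw [PySem.List.slice_from (['-', PySem.Chars.lowerChar c0] ++ emitPos rest) (a := 1) (by omega)]
    simp [PySem.Chars.lower]
  · simp only [Bool.not_eq_true] at hu
    simp [hu, PySem.Chars.lower]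

-- ===== VERDICT (by name: the statement is the Claim_ definition above) =====
theorem rule_to_category_py_spec : Claim_equal_rule_to_category_py := by
  intro rule hdom
  unfold Spec_rule_to_category_py rule_to_category_py rule_to_category_py_alt
  by_cases h0 : rule.toList.isEmpty = true
  · simp [h0]
  · simp only [h0, if_false, Bool.false_eq_true]
    have hdom' : rule.toList.all pvDomChar = true := hdom
    have hname : (if PySem.Chars.startswith rule.toList "report".toList then
        PySem.List.slice rule.toList (some 6) none else rule.toList).all pvDomChar = true := by
      split
      · rw [PySem.List.slice_from rule.toList (a := 6) (by omega)]
        exact List.all_eq_true.mpr (fun x hx => List.all_eq_true.mp hdom' x (List.mem_of_mem_drop hx))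
      · exact hdom'
    cases hn : (if PySem.Chars.startswith rule.toList "report".toList then
        PySem.List.slice rule.toList (some 6) none else rule.toList) with
    | nil => rfl
    | cons c0 rest =>
      rw [hn] at hname
      rw [kebab_eq c0 rest hname]
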